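-- pv_equiv track=rewrite | github.com/linhdvu14/cp-sols | sols/CodeChef/COOK118B/CHEFSHIP.py | solve
-- ===== SOURCE A (Python) =====
-- def z_func(s):  # O(n)
-- 	z = [0]*len(s)
-- 	l = r = 0
-- 	for i in range(1,len(s)):
-- 		if i <= r: z[i] = min(z[i-l], r-i+1)
-- 		while i+z[i] < len(s) and s[z[i]] == s[i+z[i]]: z[i] += 1
-- 		if i+z[i]-1 > r: l, r = i, i+z[i]-1
-- 	return z
--
-- def solve(S):
-- 	za = z_func(S)
-- 	zb = z_func(S[::-1])  # backward idx
-- 	res = 0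
-- 	for i in range(len(S)-2):  # cand split T1+T1|T2+T2
-- 		if i % 2 == 0: continue
-- 		ma = (i+1)//2
-- 		mb = (len(S)-i-1)//2
-- 		if za[ma] >= ma and zb[mb] >= mb: res += 1
-- 	return res
-- ===== SOURCE B (Python) =====
-- def solve(S):
--     n = len(S)
--     res = 0
--     for ma in range(1, (n - 2) // 2 + 1):
--         mb = (n - 2 * ma) // 2
--         if S[:ma] == S[ma:2 * ma] and S[n - 2 * mb:n - mb] == S[n - mb:]:
--             res += 1
--     return res
-- ===== Notes on version B (the rewrite author's own statement) =====
-- stated objective: simpler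
-- what changed: Drops the two Z-function precomputations entirely and counts valid splits by comparing the four slices of each candidate split directly in one short loop over the half-length.
import Mathlib
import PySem

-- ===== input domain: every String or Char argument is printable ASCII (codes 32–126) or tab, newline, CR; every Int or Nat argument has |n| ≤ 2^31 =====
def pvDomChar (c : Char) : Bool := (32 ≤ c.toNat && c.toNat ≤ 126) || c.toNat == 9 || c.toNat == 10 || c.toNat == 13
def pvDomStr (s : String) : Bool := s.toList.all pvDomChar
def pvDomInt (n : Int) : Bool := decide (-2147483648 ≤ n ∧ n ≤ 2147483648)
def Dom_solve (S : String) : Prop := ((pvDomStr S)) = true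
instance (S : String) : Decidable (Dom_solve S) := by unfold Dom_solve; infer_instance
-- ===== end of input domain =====

-- B replaces A's two Z-function precomputations by a direct slice comparison per candidate
-- split (simpler, one short loop; not faster — O(n^2) vs A's O(n)).

-- ===== PORT A =====
-- the `while` loop of z_func: extend the match length k at position i
-- (Python's `s[z[i]] == s[i+z[i]]` is in-range under the guard `i+z[i] < len(s)` for i ≥ 1;
-- ported via `getElem?`, exact there)
def zwhile (s : List Char) (i : Nat) (k : Nat) : Nat :=
  if h : i + k < s.length ∧ s[k]? = s[i + k]? then
    zwhile s i (k + 1)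
  else k
termination_by s.length - (i + k)
decreasing_by omega

-- one iteration of the `for i in range(1, len(s))` loop of z_func; state (z, l, r)
-- (Python's indices z[i-l], z[i] are in range during the loop, ported via getD)
def zstep (s : List Char) (i : Nat) (st : List Nat × Nat × Nat) : List Nat × Nat × Nat :=
  let z := st.1
  let l := st.2.1
  let r := st.2.2
  let zi0 := if i ≤ r then min (z.getD (i - l) 0) (r - i + 1) else z.getD i 0
  let zi := zwhile s i zi0
  let z' := z.set i zi
  if r < i + zi - 1 then (z', i, i + zi - 1) else (z', l, r)

def zgo (s : List Char) (i : Nat) (st : List Nat × Nat × Nat) : List Nat × Nat × Nat :=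
  if i < s.length then zgo s (i + 1) (zstep s i st) else st
termination_by s.length - i

-- z_func(s)
def zfun (s : List Char) : List Nat :=
  (zgo s 1 (List.replicate s.length 0, 0, 0)).1

-- solve(S); S[::-1] is List.reverse (exact for a full step -1 slice)
def solve (S : String) : Int :=
  let s := S.toList
  let n := s.length
  let za := zfun s
  let zb := zfun s.reverse
  (List.range (n - 2)).foldl (fun res i =>
    if i % 2 = 0 then res
    else
      if (i + 1) / 2 ≤ za.getD ((i + 1) / 2) 0 ∧ (n - i - 1) / 2 ≤ zb.getD ((n - i - 1) / 2) 0
      then res + 1 else res) 0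

-- ===== PORT B =====
-- direct test of each split; Python slices S[a:b] with 0 ≤ a ≤ b ≤ n ported as (drop a).take (b-a)
def solve_alt (S : String) : Int :=
  let s := S.toList
  let n := s.length
  (List.range' 1 ((n - 2) / 2)).foldl (fun res ma =>
    let mb := (n - 2 * ma) / 2
    if s.take ma = (s.drop ma).take ma ∧ (s.drop (n - 2 * mb)).take mb = s.drop (n - mb)
    then res + 1 else res) 0

-- ===== PRECONDITION & SPEC =====
def Spec_solve (S : String) (out : Int) : Prop := out = solve_alt S
instance (S : String) (out : Int) : Decidable (Spec_solve S out) := by unfold Spec_solve; infer_instance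

-- ===== CLAIM (what is proved, stated in full; the proofs are below) =====
def Claim_equal_solve : Prop := ∀ (S : String), Dom_solve S → Spec_solve S (solve S)

-- ===== LEMMAS AND PROOFS =====

-- length of the longest common prefix of two lists
def lcpN : List Char → List Char → Nat
  | a :: s, b :: t => if a = b then lcpN s t + 1 else 0
  | _, _ => 0

theorem lcpN_le_iff (k : Nat) (s t : List Char) :
    k ≤ lcpN s t ↔ k ≤ s.length ∧ k ≤ t.length ∧ s.take k = t.take k := by
  induction k generalizing s t with
  | zero => simp
  | succ k ih =>
    cases s with
    | nil => simp [lcpN]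
    | cons a s =>
      cases t with
      | nil => simp [lcpN]
      | cons b t =>
        by_cases hab : a = b
        · subst hab
          rw [show lcpN (a :: s) (a :: t) = lcpN s t + 1 from by simp [lcpN]]
          constructor
          · intro h
            obtain ⟨hA, hB, hC⟩ := (ih s t).1 (by omega)
            exact ⟨by simpa using hA, by simpa using hB, by simp [List.take_succ_cons, hC]⟩
          · rintro ⟨hA, hB, hC⟩
            simp only [List.take_succ_cons, List.cons.injEq] at hC
            have := (ih s t).2 ⟨by simpa using hA, by simpa using hB, hC.2⟩
            omega
        · rw [show lcpN (a :: s) (b :: t) = 0 from by simp [lcpN, hab]]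
          constructor
          · omega
          · rintro ⟨-, -, hC⟩
            simp only [List.take_succ_cons, List.cons.injEq] at hC
            exact absurd hC.1 hab

theorem get_eq_of_lt_lcpN {s t : List Char} {j : Nat} (h : j < lcpN s t) :
    s[j]? = t[j]? := by
  induction s generalizing t j with
  | nil => simp [lcpN] at h
  | cons a s ih =>
    cases t with
    | nil => simp [lcpN] at h
    | cons b t =>
      by_cases hab : a = b
      · subst hab
        cases j with
        | zero => simp
        | succ j =>
          rw [show lcpN (a :: s) (a :: t) = lcpN s t + 1 from by simp [lcpN]] at h
          simpa using ih (t := t) (j := j) (by omega)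
      · simp [lcpN, hab] at h

theorem lcpN_stop {s t : List Char} (h1 : lcpN s t < s.length) (h2 : lcpN s t < t.length) :
    s[lcpN s t]? ≠ t[lcpN s t]? := by
  induction s generalizing t with
  | nil => simp at h1
  | cons a s ih =>
    cases t with
    | nil => simp at h2
    | cons b t =>
      by_cases hab : a = b
      · subst hab
        rw [show lcpN (a :: s) (a :: t) = lcpN s t + 1 from by simp [lcpN]] at h1 h2 ⊢
        simp only [List.length_cons] at h1 h2
        have := ih (t := t) (by omega) (by omega)
        simp only [List.getElem?_cons_succ]
        exact this
      · simp [lcpN, hab]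

theorem le_lcpN_of_get {s t : List Char} {k : Nat}
    (hget : ∀ j, j < k → s[j]? = t[j]?) (hs : k ≤ s.length) (ht : k ≤ t.length) :
    k ≤ lcpN s t := by
  rw [lcpN_le_iff]
  refine ⟨hs, ht, ?_⟩
  apply List.ext_getElem?
  intro j
  rw [List.getElem?_take, List.getElem?_take]
  by_cases hj : j < k
  · rw [if_pos hj, if_pos hj]
    exact hget j hj
  · rw [if_neg hj, if_neg hj]

theorem lcpN_drop_le (s : List Char) (i : Nat) : lcpN s (s.drop i) ≤ s.length - i := by
  have := (lcpN_le_iff (lcpN s (s.drop i)) s (s.drop i)).1 le_rfl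
  simpa [List.length_drop] using this.2.1

-- the while loop computes the exact lcp when started at a sound offset
theorem zwhile_eq (s : List Char) (i k : Nat) (hi : 1 ≤ i)
    (hk : k ≤ lcpN s (s.drop i)) : zwhile s i k = lcpN s (s.drop i) := by
  rw [zwhile]
  split
  · next h =>
    rcases h with ⟨hlt, heq⟩
    -- k < lcp: otherwise lcpN_stop contradicts heq
    have hklt : k < lcpN s (s.drop i) := by
      rcases Nat.lt_or_ge k (lcpN s (s.drop i)) with h' | h'
      · exact h'
      · exfalso
        have hkeq : k = lcpN s (s.drop i) := le_antisymm (by omega) h'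
        have h1 : lcpN s (s.drop i) < s.length := by omega
        have h2 : lcpN s (s.drop i) < (s.drop i).length := by
          simp [List.length_drop]; omega
        have := lcpN_stop h1 h2
        rw [← hkeq] at this
        rw [List.getElem?_drop] at this
        exact this heq
    exact zwhile_eq s i (k + 1) hi (by omega)
  · next h =>
    -- loop stops: k = lcp
    rcases Nat.lt_or_ge k (lcpN s (s.drop i)) with h' | h'
    · exfalso
      apply h
      have hlen : lcpN s (s.drop i) ≤ s.length - i := lcpN_drop_le s i
      constructor
      · omega
      · have := get_eq_of_lt_lcpN h'
        rwa [List.getElem?_drop] at this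
    · omega
termination_by s.length - (i + k)
decreasing_by omega

-- invariant of the z_func loop before processing index i
def ZInv (s : List Char) (i : Nat) (st : List Nat × Nat × Nat) : Prop :=
  st.1.length = s.length ∧
  (∀ j, 1 ≤ j → j < i → st.1.getD j 0 = lcpN s (s.drop j)) ∧
  (∀ j, j = 0 ∨ i ≤ j → st.1.getD j 0 = 0) ∧
  ((st.2.1 = 0 ∧ st.2.2 = 0) ∨
    (1 ≤ st.2.1 ∧ st.2.1 ≤ i ∧ st.2.2 + 1 - st.2.1 ≤ lcpN s (s.drop st.2.1)))

theorem getD_eq_getElem? (l : List Nat) (j : Nat) : l.getD j 0 = (l[j]?).getD 0 := by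
  simp [List.getD]

theorem zstep_inv (s : List Char) (i : Nat) (st : List Nat × Nat × Nat)
    (hinv : ZInv s i st) (hi : 1 ≤ i) (hin : i < s.length) :
    ZInv s (i + 1) (zstep s i st) := by
  obtain ⟨hlen, hdone, hzero, hbox⟩ := hinv
  obtain ⟨z, l, r⟩ := st
  simp only at hlen hdone hzero hbox
  -- the initial offset is sound
  have hzi0 : (if i ≤ r then min (z.getD (i - l) 0) (r - i + 1) else z.getD i 0)
      ≤ lcpN s (s.drop i) := by
    split
    · next hir =>
      rcases hbox with ⟨hl0, hr0⟩ | ⟨hl1, hli, hrl⟩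
      · omega
      · -- box is genuine: r < s.length
        have hrlen : r + 1 ≤ s.length := by
          have := lcpN_drop_le s l
          omega
        rcases Nat.lt_or_ge l i with hlt | hge
        · -- z[i-l] is a finished entry
          have hil1 : 1 ≤ i - l := by omega
          have hil2 : i - l < i := by omega
          rw [hdone (i - l) hil1 hil2]
          set m := min (lcpN s (s.drop (i - l))) (r - i + 1) with hm
          apply le_lcpN_of_get (k := m) ?_ (by omega) (by simp [List.length_drop]; omega)
          intro t ht
          have e1 : s[t]? = s[(i - l) + t]? := by
            have := get_eq_of_lt_lcpN (s := s) (t := s.drop (i - l)) (j := t) (by omega)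
            rwa [List.getElem?_drop] at this
          have e2 : s[(i - l) + t]? = s[i + t]? := by
            have hlt2 : (i - l) + t < lcpN s (s.drop l) := by omega
            have := get_eq_of_lt_lcpN (s := s) (t := s.drop l) (j := (i - l) + t) hlt2
            rw [List.getElem?_drop] at this
            have : s[(i - l) + t]? = s[l + ((i - l) + t)]? := this
            rwa [show l + ((i - l) + t) = i + t by omega] at this
          rw [e1, e2, List.getElem?_drop]
        · -- l = i: the entry read is z[0] = 0
          have : i - l = 0 := by omega
          rw [this, hzero 0 (Or.inl rfl)]
          simp
    · rw [hzero i (Or.inr le_rfl)]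
      exact Nat.zero_le _
  have hzi : zwhile s i (if i ≤ r then min (z.getD (i - l) 0) (r - i + 1) else z.getD i 0)
      = lcpN s (s.drop i) := zwhile_eq s i _ hi hzi0
  simp only [zstep, hzi]
  set zi := lcpN s (s.drop i) with hzidef
  have hset_i : (z.set i zi).getD i 0 = zi := by
    rw [getD_eq_getElem?]
    simp [hlen, hin]
  have hset_ne : ∀ j, j ≠ i → (z.set i zi).getD j 0 = z.getD j 0 := by
    intro j hj
    rw [getD_eq_getElem?, getD_eq_getElem?]
    simp [(Ne.symm hj)]
  have hz'len : (z.set i zi).length = s.length := by simp [hlen]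
  have hz'done : ∀ j, 1 ≤ j → j < i + 1 → (z.set i zi).getD j 0 = lcpN s (s.drop j) := by
    intro j h1 h2
    rcases Nat.lt_or_ge j i with hj | hj
    · rw [hset_ne j (by omega)]; exact hdone j h1 hj
    · have : j = i := by omega
      subst this
      exact hset_i
  have hz'zero : ∀ j, j = 0 ∨ i + 1 ≤ j → (z.set i zi).getD j 0 = 0 := by
    intro j hj
    rw [hset_ne j (by omega)]
    exact hzero j (by omega)
  split
  · exact ⟨hz'len, hz'done, hz'zero,
      Or.inr ⟨hi, show i ≤ i + 1 by omega, show i + zi - 1 + 1 - i ≤ zi by omega⟩⟩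
  · refine ⟨hz'len, hz'done, hz'zero, ?_⟩
    rcases hbox with h | ⟨h1, h2, h3⟩
    · exact Or.inl h
    · exact Or.inr ⟨h1, show l ≤ i + 1 by omega, h3⟩

theorem zgo_spec (s : List Char) (i : Nat) (st : List Nat × Nat × Nat)
    (hinv : ZInv s i st) (hi : 1 ≤ i) :
    ∀ j, 1 ≤ j → j < s.length → (zgo s i st).1.getD j 0 = lcpN s (s.drop j) := by
  intro j h1 h2
  rw [zgo]
  split
  · next h =>
    exact zgo_spec s (i + 1) (zstep s i st) (zstep_inv s i st hinv hi h) (by omega) j h1 h2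
  · next h =>
    exact hinv.2.1 j h1 (by omega)
termination_by s.length - i

theorem zfun_getD (s : List Char) (j : Nat) (h1 : 1 ≤ j) (h2 : j < s.length) :
    (zfun s).getD j 0 = lcpN s (s.drop j) := by
  apply zgo_spec s 1 _ ?_ le_rfl j h1 h2
  refine ⟨by simp, by omega, ?_, Or.inl ⟨rfl, rfl⟩⟩
  intro k _
  rw [getD_eq_getElem?, List.getElem?_replicate]
  split <;> rfl

-- counting form of the two foldl loops
theorem foldl_if2 (L : List Nat) (q C : Nat → Prop) [DecidablePred q] [DecidablePred C] (r : Int) :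
    L.foldl (fun res i => if q i then res else if C i then res + 1 else res) r
      = r + L.countP (fun i => decide (¬ q i ∧ C i)) := by
  induction L generalizing r with
  | nil => simp
  | cons a L ih =>
    simp only [List.foldl_cons, List.countP_cons, ih]
    by_cases hq : q a <;> by_cases hC : C a <;> (simp [hq, hC]; try omega)

theorem foldl_if1 (L : List Nat) (C : Nat → Prop) [DecidablePred C] (r : Int) :
    L.foldl (fun res i => if C i then res + 1 else res) r
      = r + L.countP (fun i => decide (C i)) := by
  induction L generalizing r with
  | nil => simp
  | cons a L ih =>
    simp only [List.foldl_cons, List.countP_cons, ih]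
    by_cases hC : C a <;> (simp [hC]; try omega)

-- reindexing the odd elements of range m by their half
theorem countP_range_odd (m : Nat) (p : Nat → Bool) (h : ∀ i, i % 2 = 0 → p i = false) :
    (List.range m).countP p = (List.range' 1 (m / 2)).countP (fun a => p (2 * a - 1)) := by
  induction m with
  | zero => simp
  | succ m ih =>
    rw [List.range_succ, List.countP_append, ih]
    rcases Nat.mod_two_eq_zero_or_one m with hm | hm
    · have he2 : (m + 1) / 2 = m / 2 := by omega
      rw [he2]
      simp [h m hm]
    · have h2 : (m + 1) / 2 = m / 2 + 1 := by omega
      rw [h2]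
      have hconcat : List.range' 1 (m / 2 + 1) = List.range' 1 (m / 2) ++ [1 + m / 2] := by
        simpa using List.range'_concat (step := 1) (s := 1) (n := m / 2)
      rw [hconcat, List.countP_append]
      have hm2 : 2 * (1 + m / 2) - 1 = m := by omega
      simp [List.countP_singleton, hm2]

-- the front condition of A equals B's front slice test, for 1 ≤ ma, 2*ma + 2 ≤ n
theorem front_iff (s : List Char) (ma : Nat) (h1 : 1 ≤ ma) (h2 : 2 * ma + 2 ≤ s.length) :
    (ma ≤ (zfun s).getD ma 0) ↔ s.take ma = (s.drop ma).take ma := by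
  rw [zfun_getD s ma h1 (by omega), lcpN_le_iff]
  constructor
  · exact fun h => h.2.2
  · intro h
    exact ⟨by omega, by simp [List.length_drop]; omega, h⟩

-- the back condition of A equals B's back slice test, for 1 ≤ mb, 2*mb ≤ n
theorem back_iff (s : List Char) (mb : Nat) (h1 : 1 ≤ mb) (h2 : 2 * mb ≤ s.length) :
    (mb ≤ (zfun s.reverse).getD mb 0)
      ↔ (s.drop (s.length - 2 * mb)).take mb = s.drop (s.length - mb) := by
  rw [zfun_getD s.reverse mb h1 (by rw [List.length_reverse]; omega), lcpN_le_iff]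
  have e1 : s.reverse.take mb = (s.drop (s.length - mb)).reverse := by
    rw [List.take_reverse]
  have e2 : (s.reverse.drop mb).take mb = ((s.drop (s.length - 2 * mb)).take mb).reverse := by
    rw [List.drop_reverse, List.take_reverse, List.length_take, List.drop_take,
      show min (s.length - mb) s.length - mb = s.length - 2 * mb from by omega,
      show s.length - mb - (s.length - 2 * mb) = mb from by omega]
  rw [e1, e2]
  constructor
  · intro h
    have := h.2.2
    exact (List.reverse_injective this).symm
  · intro h
    refine ⟨by rw [List.length_reverse]; omega, ?_, by rw [h]⟩
    rw [List.length_drop, List.length_reverse]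
    omega

theorem solve_eq (S : String) : solve S = solve_alt S := by
  unfold solve solve_alt
  set s := S.toList with hs
  set n := s.length with hn
  set za := zfun s with hza
  set zb := zfun s.reverse with hzb
  rw [foldl_if2 (List.range (n - 2)) (fun i => i % 2 = 0)
    (fun i => (i + 1) / 2 ≤ za.getD ((i + 1) / 2) 0 ∧ (n - i - 1) / 2 ≤ zb.getD ((n - i - 1) / 2) 0) 0]
  rw [foldl_if1 (List.range' 1 ((n - 2) / 2))
    (fun ma => s.take ma = (s.drop ma).take ma ∧
      (s.drop (n - 2 * ((n - 2 * ma) / 2))).take ((n - 2 * ma) / 2) = s.drop (n - ((n - 2 * ma) / 2))) 0]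
  rw [countP_range_odd (n - 2) _ (by intro i hi; simp [hi])]
  congr 1
  congr 1
  apply List.countP_congr
  intro ma hma
  have hmem : 1 ≤ ma ∧ ma ≤ (n - 2) / 2 := by
    have := List.mem_range'.1 hma
    omega
  obtain ⟨h1, h2⟩ := hmem
  have h2n : 2 * ma + 2 ≤ n := by omega
  set i := 2 * ma - 1 with hidef
  have hodd : ¬ i % 2 = 0 := by omega
  have hma' : (i + 1) / 2 = ma := by omega
  have hmb' : (n - i - 1) / 2 = (n - 2 * ma) / 2 := by omega
  set mb := (n - 2 * ma) / 2 with hmbdef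
  have hmb1 : 1 ≤ mb := by omega
  have hmb2 : 2 * mb ≤ n := by omega
  simp only [decide_eq_true_eq]
  rw [hma', hmb']
  have hfr := front_iff s ma h1 h2n
  have hbk := back_iff s mb hmb1 hmb2
  constructor
  · rintro ⟨-, hA1, hA2⟩
    exact ⟨hfr.1 hA1, hbk.1 hA2⟩
  · rintro ⟨hB1, hB2⟩
    exact ⟨hodd, hfr.2 hB1, hbk.2 hB2⟩

-- ===== VERDICT (by name: the statement is the Claim_ definition above) =====
theorem solve_spec : Claim_equal_solve := by
  intro S _
  unfold Spec_solve
  exact solve_eq S
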